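-- pv_equiv track=rewrite | github.com/Th1nWheel03/CodeWars | Python/NaugthyOrNice/Epreuve7.py | naughty_or_nice
-- ===== SOURCE A (Python) =====
-- def naughty_or_nice(data):
--     compteur_naughty = sum(1 for month in data.values() for value in month.values() if value == 'Naughty')
--     compteur_nice = sum(1 for month in data.values() for value in month.values() if value == 'Nice')
--
--     if compteur_naughty > compteur_nice:
--         return "Naughty!"
--     elif compteur_naughty < compteur_nice:
--         return "Nice!"
--     else:
--         return "Nice!"
-- ===== SOURCE B (Python) =====
-- def naughty_or_nice(data):
--     # Maintain a single signed balance instead of two category counts: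
--     # +1 per 'Naughty', -1 per 'Nice' (branch-free boolean arithmetic).
--     score = 0
--     for month in data.values():
--         for v in month.values():
--             score += (v == 'Naughty') - (v == 'Nice')
--     return "Naughty!" if score > 0 else "Nice!"
-- ===== Notes on version B (the rewrite author's own statement) =====
-- stated objective: alternative
-- what changed: B never computes the two category counts: it keeps one signed balance (+1 per 'Naughty', -1 per 'Nice', via branch-free boolean arithmetic) in a single traversal and returns 'Naughty!' iff the balance is positive, whereas A makes two separate counting passes and compares the counts (its equal/less branches both yielding 'Nice!').
import Mathlib
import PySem

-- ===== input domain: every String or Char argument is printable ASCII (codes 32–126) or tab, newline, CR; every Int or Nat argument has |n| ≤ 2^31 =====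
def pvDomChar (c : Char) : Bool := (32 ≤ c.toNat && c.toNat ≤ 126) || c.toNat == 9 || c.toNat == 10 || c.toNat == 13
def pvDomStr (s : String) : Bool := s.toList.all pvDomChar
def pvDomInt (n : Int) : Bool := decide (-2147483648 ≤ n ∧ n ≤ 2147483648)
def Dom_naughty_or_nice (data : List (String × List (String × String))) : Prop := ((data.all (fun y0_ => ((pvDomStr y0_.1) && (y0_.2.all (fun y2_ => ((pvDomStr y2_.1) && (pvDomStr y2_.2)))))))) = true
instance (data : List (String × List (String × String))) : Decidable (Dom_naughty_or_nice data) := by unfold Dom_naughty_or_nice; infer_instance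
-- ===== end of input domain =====

-- B keeps one signed balance (+1 per 'Naughty', -1 per 'Nice', from boolean arithmetic) and tests it against 0, instead of A's two counting passes compared against each other (objective: alternative).


-- ===== PORT A =====
-- sum(1 for month in data.values() for value in month.values() if value == target)
def pvCountAll (target : String) (data : List (String × List (String × String))) : Int :=
  data.foldl (fun acc month => month.2.foldl (fun a v => if v.2 == target then a + 1 else a) acc) 0

def naughty_or_nice (data : List (String × List (String × String))) : String :=
  let compteur_naughty := pvCountAll "Naughty" data
  let compteur_nice := pvCountAll "Nice" data
  if compteur_naughty > compteur_nice then "Naughty!"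
  else if compteur_naughty < compteur_nice then "Nice!"
  else "Nice!"

-- ===== PORT B =====
-- (v == 'Naughty') - (v == 'Nice') as Python bool→int arithmetic
def pvScoreStep (v : String) : Int :=
  (if v == "Naughty" then 1 else 0) - (if v == "Nice" then 1 else 0)

def naughty_or_nice_alt (data : List (String × List (String × String))) : String :=
  let score := data.foldl (fun s month => month.2.foldl (fun s v => s + pvScoreStep v.2) s) 0
  if score > 0 then "Naughty!" else "Nice!"

-- ===== PRECONDITION & SPEC =====
def Spec_naughty_or_nice (data : List (String × List (String × String))) (out : String) : Prop := out = naughty_or_nice_alt data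
instance (data : List (String × List (String × String))) (out : String) : Decidable (Spec_naughty_or_nice data out) := by unfold Spec_naughty_or_nice; infer_instance

-- ===== CLAIM (what is proved, stated in full; the proofs are below) =====
def Claim_equal_naughty_or_nice : Prop := ∀ (data : List (String × List (String × String))), Dom_naughty_or_nice data → Spec_naughty_or_nice data (naughty_or_nice data)

-- ===== LEMMAS AND PROOFS =====
theorem count_shift (p : String × String → Bool) (m : List (String × String)) (s : Int) :
    m.foldl (fun a v => if p v then a + 1 else a) s
    = s + m.foldl (fun a v => if p v then a + 1 else a) 0 := by
  induction m generalizing s with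
  | nil => simp
  | cons v rest ih =>
    simp only [List.foldl]
    rw [ih, ih (if p v then (0:Int) + 1 else 0)]
    split <;> ring

theorem score_shift (m : List (String × String)) (s : Int) :
    m.foldl (fun s v => s + pvScoreStep v.2) s
    = s + m.foldl (fun s v => s + pvScoreStep v.2) 0 := by
  induction m generalizing s with
  | nil => simp
  | cons v rest ih =>
    simp only [List.foldl]
    rw [ih, ih (0 + pvScoreStep v.2)]
    ring

theorem score_month (m : List (String × String)) :
    m.foldl (fun s v => s + pvScoreStep v.2) 0
    = m.foldl (fun a v => if v.2 == "Naughty" then a + 1 else a) 0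
      - m.foldl (fun a v => if v.2 == "Nice" then a + 1 else a) 0 := by
  induction m with
  | nil => simp
  | cons v rest ih =>
    simp only [List.foldl]
    rw [score_shift, ih,
        count_shift (fun v => v.2 == "Naughty") rest (if v.2 == "Naughty" then (0:Int) + 1 else 0),
        count_shift (fun v => v.2 == "Nice") rest (if v.2 == "Nice" then (0:Int) + 1 else 0)]
    unfold pvScoreStep
    split <;> split <;> ring

theorem outer_count_shift (target : String) (data : List (String × List (String × String))) (s : Int) :
    data.foldl (fun acc month => month.2.foldl (fun a v => if v.2 == target then a + 1 else a) acc) s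
    = s + data.foldl (fun acc month => month.2.foldl (fun a v => if v.2 == target then a + 1 else a) acc) 0 := by
  induction data generalizing s with
  | nil => simp
  | cons month rest ih =>
    simp only [List.foldl]
    rw [ih, ih (month.2.foldl (fun a v => if v.2 == target then a + 1 else a) 0),
        count_shift (fun v => v.2 == target) month.2 s]
    ring

theorem outer_score_shift (data : List (String × List (String × String))) (s : Int) :
    data.foldl (fun s month => month.2.foldl (fun s v => s + pvScoreStep v.2) s) s
    = s + data.foldl (fun s month => month.2.foldl (fun s v => s + pvScoreStep v.2) s) 0 := by
  induction data generalizing s with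
  | nil => simp
  | cons month rest ih =>
    simp only [List.foldl]
    rw [ih, ih (month.2.foldl (fun s v => s + pvScoreStep v.2) 0),
        score_shift month.2 s]
    ring

theorem score_eq_counts (data : List (String × List (String × String))) :
    data.foldl (fun s month => month.2.foldl (fun s v => s + pvScoreStep v.2) s) 0
    = pvCountAll "Naughty" data - pvCountAll "Nice" data := by
  unfold pvCountAll
  induction data with
  | nil => simp
  | cons month rest ih =>
    simp only [List.foldl]
    rw [outer_score_shift, score_month, ih,
        outer_count_shift "Naughty" rest
          (month.2.foldl (fun a v => if v.2 == "Naughty" then a + 1 else a) 0),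
        outer_count_shift "Nice" rest
          (month.2.foldl (fun a v => if v.2 == "Nice" then a + 1 else a) 0)]
    ring

-- ===== VERDICT (by name: the statement is the Claim_ definition above) =====
theorem naughty_or_nice_spec : Claim_equal_naughty_or_nice := by
  intro data _
  unfold Spec_naughty_or_nice naughty_or_nice naughty_or_nice_alt
  rw [score_eq_counts]
  dsimp only
  split_ifs with h1 h2 <;> first | rfl | omega
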